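-- pv_equiv track=rewrite | github.com/landasmiller/erebyss_feedback_aggregator | main.py | _priority_from_evidence_text
-- ===== SOURCE A (Python) =====
-- from typing import Any, Dict, List, Optional, Tuple
-- from typing import Dict, List
--
-- def _priority_from_evidence_text(evidence_texts: List[str]) -> int:
--     """
--     Simple MVP heuristic priority scoring:
--     5 = critical, 4 = high, 3 = medium, 2 = low, 1 = very low
--     """
--     text = " ".join([t.lower() for t in evidence_texts if t]).strip()
--     if not text:
--         return 3
--
--     critical_terms = ["crash", "crashes", "down", "outage", "cannot", "can't", "won't", "broken", "fails", "error"]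
--     high_terms = ["slow", "timeout", "doesn't work", "does not work", "stuck", "blocked", "login", "payment"]
--
--     score = 3
--     if any(term in text for term in critical_terms):
--         score = max(score, 5)
--     elif any(term in text for term in high_terms):
--         score = max(score, 4)
--
--     # cap 1..5
--     return max(1, min(5, score))
-- ===== SOURCE B (Python) =====
-- _CRITICAL = ["crash", "crashes", "down", "outage", "cannot", "can't", "won't", "broken", "fails", "error"]
-- _HIGH = ["slow", "timeout", "doesn't work", "does not work", "stuck", "blocked", "login", "payment"]
--
-- def _priority_from_evidence_text(evidence_texts):
--     text = " ".join(t.lower() for t in evidence_texts if t).strip()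
--     if not text:
--         return 3
--     # Single left-to-right scan over the text: at each position check which
--     # terms START there; early exit at critical (score 5 dominates everything).
--     best = 3
--     for i in range(len(text)):
--         if any(text.startswith(t, i) for t in _CRITICAL):
--             return 5
--         if best < 4 and any(text.startswith(t, i) for t in _HIGH):
--             best = 4
--     return best
-- ===== Notes on version B (the rewrite author's own statement) =====
-- stated objective: alternative
-- what changed: Replaces term-driven 'term in text' substring scans behind an if/elif with a single text-driven left-to-right scan: at each position it checks which terms start there, returns 5 immediately on a critical match and records 4 for a high match; correct because 'term in text' holds iff the term is a prefix of some suffix, and critical dominates high.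
import Mathlib
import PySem

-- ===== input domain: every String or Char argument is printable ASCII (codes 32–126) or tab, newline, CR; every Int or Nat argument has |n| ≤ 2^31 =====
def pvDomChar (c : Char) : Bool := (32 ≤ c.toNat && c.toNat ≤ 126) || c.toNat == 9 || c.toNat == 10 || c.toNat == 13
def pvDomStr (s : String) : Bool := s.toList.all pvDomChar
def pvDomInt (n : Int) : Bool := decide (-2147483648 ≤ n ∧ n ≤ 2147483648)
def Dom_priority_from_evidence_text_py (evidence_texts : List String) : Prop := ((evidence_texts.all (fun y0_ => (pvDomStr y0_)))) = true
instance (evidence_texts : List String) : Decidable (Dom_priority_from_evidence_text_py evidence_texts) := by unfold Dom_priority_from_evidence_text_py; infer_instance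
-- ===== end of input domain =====

-- B replaces A's term-driven if/elif of two any('term in text') scans with one text-driven
-- left-to-right scan checking which terms start at each position; objective: alternative.
-- ===== PORT A =====
def priority_from_evidence_text_py (evidence_texts : List String) : Int :=
  let text := PySem.Str.strip (PySem.Str.join " " ((evidence_texts.filter (fun t => t ≠ "")).map PySem.Str.lower))
  if text = "" then 3
  else
    let critical_terms : List String := ["crash", "crashes", "down", "outage", "cannot", "can't", "won't", "broken", "fails", "error"]
    let high_terms : List String := ["slow", "timeout", "doesn't work", "does not work", "stuck", "blocked", "login", "payment"]
    let score : Int := 3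
    let score : Int :=
      if critical_terms.any (fun term => PySem.Str.isIn term text) then max score 5
      else if high_terms.any (fun term => PySem.Str.isIn term text) then max score 4
      else score
    max 1 (min 5 score)

-- ===== PORT B =====
def pvCritical : List (List Char) :=
  (["crash", "crashes", "down", "outage", "cannot", "can't", "won't", "broken", "fails", "error"] : List String).map String.toList
def pvHigh : List (List Char) :=
  (["slow", "timeout", "doesn't work", "does not work", "stuck", "blocked", "login", "payment"] : List String).map String.toList

-- the loop 'for i in range(len(text)): tail = text[i:] …' as structural recursion over the suffixes
def pvScan (crit high : List (List Char)) (txt : List Char) (best : Int) : Int :=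
  match txt with
  | [] => best
  | c :: rest =>
    if crit.any (fun t => PySem.Chars.startswith (c :: rest) t) then 5
    else if best < 4 ∧ high.any (fun t => PySem.Chars.startswith (c :: rest) t) then
      pvScan crit high rest 4
    else
      pvScan crit high rest best

def priority_from_evidence_text_py_alt (evidence_texts : List String) : Int :=
  let text := PySem.Str.strip (PySem.Str.join " " ((evidence_texts.filter (fun t => t ≠ "")).map PySem.Str.lower))
  if text = "" then 3
  else pvScan pvCritical pvHigh text.toList 3

-- ===== PRECONDITION & SPEC =====
def Spec_priority_from_evidence_text_py (evidence_texts : List String) (out : Int) : Prop := out = priority_from_evidence_text_py_alt evidence_texts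
instance (evidence_texts : List String) (out : Int) : Decidable (Spec_priority_from_evidence_text_py evidence_texts out) := by unfold Spec_priority_from_evidence_text_py; infer_instance

-- ===== CLAIM (what is proved, stated in full; the proofs are below) =====
def Claim_equal_priority_from_evidence_text_py : Prop := ∀ (evidence_texts : List String), Dom_priority_from_evidence_text_py evidence_texts → Spec_priority_from_evidence_text_py evidence_texts (priority_from_evidence_text_py evidence_texts)

-- ===== LEMMAS AND PROOFS =====
-- 'sub in txt' splits at a cons: sub starts here, or occurs in the rest.
theorem pv_isIn_cons (sub : List Char) (c : Char) (rest : List Char) :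
    PySem.Chars.isIn sub (c :: rest)
      = (PySem.Chars.startswith (c :: rest) sub || PySem.Chars.isIn sub rest) := by
  rw [Bool.eq_iff_iff]
  simp only [Bool.or_eq_true, PySem.Chars.isIn_iff_infix, PySem.Chars.startswith_iff,
    List.infix_cons_iff]

-- the same split pushed through an any() over a term list
theorem pv_any_cons (ts : List (List Char)) (c : Char) (rest : List Char) :
    ts.any (fun t => PySem.Chars.isIn t (c :: rest))
      = (ts.any (fun t => PySem.Chars.startswith (c :: rest) t)
          || ts.any (fun t => PySem.Chars.isIn t rest)) := by
  induction ts with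
  | nil => simp
  | cons t ts ih =>
    simp only [List.any_cons, pv_isIn_cons t c rest, ih]
    cases PySem.Chars.startswith (c :: rest) t <;> cases PySem.Chars.isIn t rest <;>
      simp [Bool.or_comm]

-- The text-driven scan computes exactly A's if/elif value, for nonempty terms and best ∈ {3,4}.
theorem pvScan_eq (crit high : List (List Char))
    (hc : ∀ t ∈ crit, t ≠ []) (hh : ∀ t ∈ high, t ≠ []) :
    ∀ (txt : List Char) (best : Int), best = 3 ∨ best = 4 →
    pvScan crit high txt best
      = if crit.any (fun t => PySem.Chars.isIn t txt) then 5
        else if best = 4 ∨ high.any (fun t => PySem.Chars.isIn t txt) = true then 4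
        else best := by
  intro txt
  induction txt with
  | nil =>
    intro best hb
    have hz : ∀ (us : List (List Char)), (∀ t ∈ us, t ≠ []) →
        us.any (fun t => PySem.Chars.isIn t ([] : List Char)) = false := by
      intro us hus
      simp only [List.any_eq_false]
      intro t ht
      rw [Bool.not_eq_true, PySem.Chars.isIn_eq_false_iff]
      simpa [List.infix_nil] using hus t ht
    rcases hb with rfl | rfl <;> simp [pvScan, hz crit hc, hz high hh]
  | cons c rest ih =>
    intro best hb
    simp only [pvScan, pv_any_cons]
    cases hcs : crit.any (fun t => PySem.Chars.startswith (c :: rest) t) with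
    | true => simp
    | false =>
      simp only [Bool.false_or]
      by_cases h4 : best < 4 ∧ high.any (fun t => PySem.Chars.startswith (c :: rest) t) = true
      · rw [if_pos h4, ih 4 (Or.inr rfl)]
        cases hir : crit.any (fun t => PySem.Chars.isIn t rest) <;>
          simp [h4.2]
      · rw [if_neg h4, ih best hb]
        rcases hb with rfl | rfl
        · have hsw : high.any (fun t => PySem.Chars.startswith (c :: rest) t) = false := by
            cases h' : high.any (fun t => PySem.Chars.startswith (c :: rest) t)
            · rfl
            · exact absurd ⟨by norm_num, h'⟩ h4
          cases hir : crit.any (fun t => PySem.Chars.isIn t rest) <;>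
            cases hhr : high.any (fun t => PySem.Chars.isIn t rest) <;>
              simp [hsw]
        · cases hir : crit.any (fun t => PySem.Chars.isIn t rest) <;> simp

-- any() over String terms equals any() over their char lists
theorem pv_any_toList (ts : List String) (text : String) :
    (ts.map String.toList).any (fun t => PySem.Chars.isIn t text.toList)
      = ts.any (fun term => PySem.Str.isIn term text) := by
  rw [List.any_map]
  rfl

-- ===== VERDICT (by name: the statement is the Claim_ definition above) =====
theorem priority_from_evidence_text_py_spec : Claim_equal_priority_from_evidence_text_py := by
  intro evidence_texts _
  unfold Spec_priority_from_evidence_text_py priority_from_evidence_text_py priority_from_evidence_text_py_alt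
  set text := PySem.Str.strip (PySem.Str.join " " ((evidence_texts.filter (fun t => t ≠ "")).map PySem.Str.lower)) with htext
  by_cases h : text = ""
  · simp [h]
  · simp only [if_neg h]
    rw [pvScan_eq pvCritical pvHigh (by decide) (by decide) text.toList 3 (Or.inl rfl)]
    rw [show pvCritical = (["crash", "crashes", "down", "outage", "cannot", "can't", "won't", "broken", "fails", "error"] : List String).map String.toList from rfl,
        show pvHigh = (["slow", "timeout", "doesn't work", "does not work", "stuck", "blocked", "login", "payment"] : List String).map String.toList from rfl,
        pv_any_toList, pv_any_toList]
    cases hA : (["crash", "crashes", "down", "outage", "cannot", "can't", "won't", "broken", "fails", "error"] : List String).any (fun term => PySem.Str.isIn term text) <;>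
      cases hB : (["slow", "timeout", "doesn't work", "does not work", "stuck", "blocked", "login", "payment"] : List String).any (fun term => PySem.Str.isIn term text) <;>
        norm_num
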